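-- pv_equiv track=rewrite | github.com/mit-tim777/Origami_Optimizer | Offset_energy_calculator/calculate.py | get_all_possible_sequences
-- ===== SOURCE A (Python) =====
-- def get_all_possible_sequences(sequence):
--     sequence = "".join(sequence)
--     placeholder_inds = [ index for index, val in enumerate(sequence) if val == '-']
--     possible_sequences = [sequence]
--     for i in placeholder_inds:
--         next_possible_sequences = []
--         for seq in possible_sequences:
--             for base in ['A','T','C','G']:
--                 seq2 = list(seq)
--                 seq2[i] = base
--                 next_possible_sequences.append(''.join(seq2))
--         possible_sequences = next_possible_sequences.copy()
--     return possible_sequences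
-- ===== SOURCE B (Python) =====
-- def get_all_possible_sequences(sequence):
--     # single left-to-right scan: buffer literal chars in `segment`, and only at each
--     # '-' extend every partial prefix by the buffered segment and one of the 4 bases
--     results = ['']
--     segment = []
--     for ch in "".join(sequence):
--         if ch == '-':
--             part = ''.join(segment)
--             segment = []
--             results = [r + part + base for r in results for base in 'ATCG']
--         else:
--             segment.append(ch)
--     tail = ''.join(segment)
--     return [r + tail for r in results]
-- ===== Notes on version B (the rewrite author's own statement) =====
-- stated objective: simpler
-- what changed: Replaces A's placeholder-index list and per-placeholder rebuild of every candidate (copy to a char list, mutate one index, rejoin) with a single left-to-right scan that buffers literal characters and extends a list of partial prefixes 4-fold only at each '-'.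
import Mathlib
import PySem

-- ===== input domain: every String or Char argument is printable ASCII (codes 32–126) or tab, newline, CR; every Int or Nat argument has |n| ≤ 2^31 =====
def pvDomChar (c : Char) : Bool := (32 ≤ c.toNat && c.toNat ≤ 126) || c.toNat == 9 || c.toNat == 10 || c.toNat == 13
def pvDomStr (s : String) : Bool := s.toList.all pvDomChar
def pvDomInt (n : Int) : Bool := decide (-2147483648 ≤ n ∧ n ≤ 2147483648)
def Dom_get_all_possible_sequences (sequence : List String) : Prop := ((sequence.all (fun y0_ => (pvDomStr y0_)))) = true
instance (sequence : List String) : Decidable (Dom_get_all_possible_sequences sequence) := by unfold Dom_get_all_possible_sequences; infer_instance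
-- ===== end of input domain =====

-- B replaces A's placeholder-index bookkeeping with one left-to-right scan over the joined
-- string that extends partial prefixes (objective: simpler).

-- ===== PORT A =====
-- strings are carried as List Char (the PySem representation); String.ofList is the bridge back
def get_all_possible_sequences (sequence : List String) : List String :=
  let s : List Char := (PySem.Str.join "" sequence).toList
  let placeholder_inds : List Int :=
    ((PySem.List.enumerate s).filter (fun p => p.2 == '-')).map (fun p => p.1)
  let possible_sequences : List (List Char) := [s]
  let possible_sequences := placeholder_inds.foldl
    (fun possible_sequences i =>
      possible_sequences.foldl
        (fun next_possible_sequences seq =>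
          (['A', 'T', 'C', 'G']).foldl
            (fun next_possible_sequences base =>
              next_possible_sequences ++ [PySem.List.pySetD seq i base])
            next_possible_sequences)
        [])
    possible_sequences
  possible_sequences.map String.ofList

-- ===== PORT B =====
def get_all_possible_sequences_alt (sequence : List String) : List String :=
  let s : List Char := (PySem.Str.join "" sequence).toList
  let st := s.foldl
    (fun (st : List (List Char) × List Char) ch =>
      if ch == '-' then
        (st.1.flatMap (fun r => (['A', 'T', 'C', 'G']).map (fun base => r ++ st.2 ++ [base])),
         ([] : List Char))
      else
        (st.1, st.2 ++ [ch]))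
    (([[]], []) : List (List Char) × List Char)
  (st.1.map (fun r => r ++ st.2)).map String.ofList

-- ===== PRECONDITION & SPEC =====
def Spec_get_all_possible_sequences (sequence : List String) (out : List String) : Prop := out = get_all_possible_sequences_alt sequence
instance (sequence : List String) (out : List String) : Decidable (Spec_get_all_possible_sequences sequence out) := by unfold Spec_get_all_possible_sequences; infer_instance

-- ===== CLAIM (what is proved, stated in full; the proofs are below) =====
def Claim_equal_get_all_possible_sequences : Prop := ∀ (sequence : List String), Dom_get_all_possible_sequences sequence → Spec_get_all_possible_sequences sequence (get_all_possible_sequences sequence)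

-- ===== LEMMAS AND PROOFS =====

def pvBases : List Char := ['A', 'T', 'C', 'G']

-- the common value of both loops: all fillings of the '-' positions, first '-' most significant
def pvExpand : List Char → List (List Char)
  | [] => [[]]
  | c :: cs =>
      if c = '-' then pvBases.flatMap (fun b => (pvExpand cs).map (fun t => b :: t))
      else (pvExpand cs).map (fun t => c :: t)

-- A's loop, after pySetD is turned into List.set on Nat indices
def pvLoopA (inds : List Nat) (poss : List (List Char)) : List (List Char) :=
  inds.foldl (fun poss n => poss.flatMap (fun seq => pvBases.map (fun b => seq.set n b))) poss

-- Nat-valued placeholder indices of s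
def pvInds : List Char → List Nat
  | [] => []
  | c :: cs => if c = '-' then 0 :: (pvInds cs).map (· + 1) else (pvInds cs).map (· + 1)

theorem pvEnum_filter (s : List Char) (k : Int) :
    (((PySem.List.enumerate s k).filter (fun p => p.2 == '-')).map (fun p => p.1))
      = (pvInds s).map (fun n : Nat => k + (n : Int)) := by
  induction s generalizing k with
  | nil => simp [PySem.List.enumerate, pvInds]
  | cons c cs ih =>
    rw [PySem.List.enumerate_cons]
    by_cases h : c = '-' <;>
      · simp [pvInds, h, ih (k + 1)]
        intro n _
        ring

theorem pvLoopA_append (inds : List Nat) (xs ys : List (List Char)) :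
    pvLoopA inds (xs ++ ys) = pvLoopA inds xs ++ pvLoopA inds ys := by
  induction inds generalizing xs ys with
  | nil => simp [pvLoopA]
  | cons n rest ih =>
    simp only [pvLoopA, List.foldl_cons] at *
    rw [List.flatMap_append, ih]

theorem pvLoopA_flatMap {α : Type} (inds : List Nat) (L : List α) (f : α → List (List Char)) :
    pvLoopA inds (L.flatMap f) = L.flatMap (fun x => pvLoopA inds (f x)) := by
  induction L with
  | nil =>
    simp only [List.flatMap_nil]
    induction inds with
    | nil => rfl
    | cons n rest ih => simpa [pvLoopA] using ih
  | cons x L ih => simp only [List.flatMap_cons, pvLoopA_append, ih]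

theorem pvLoopA_shift (inds : List Nat) (x : Char) (L : List (List Char)) :
    pvLoopA (inds.map (· + 1)) (L.map (fun u => x :: u))
      = (pvLoopA inds L).map (fun u => x :: u) := by
  induction inds generalizing L with
  | nil => simp [pvLoopA]
  | cons n rest ih =>
    simp only [pvLoopA, List.map_cons, List.foldl_cons] at *
    rw [← ih]
    congr 1
    simp [List.flatMap_map, List.map_flatMap, List.set_cons_succ, Function.comp_def]

theorem pvLoopA_expand (s : List Char) : pvLoopA (pvInds s) [s] = pvExpand s := by
  induction s with
  | nil => rfl
  | cons c cs ih =>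
    by_cases h : c = '-'
    · subst h
      simp only [pvInds, pvExpand]
      show pvLoopA ((pvInds cs).map (· + 1))
        ([('-' : Char) :: cs].flatMap (fun seq => pvBases.map (fun b => seq.set 0 b))) = _
      rw [List.flatMap_singleton]
      have : (pvBases.map (fun b => (('-' : Char) :: cs).set 0 b))
          = pvBases.flatMap (fun b => [b :: cs]) := by
        simp [List.flatMap_def]
        rfl
      rw [this, pvLoopA_flatMap]
      refine List.flatMap_congr ?_
      intro b _
      have := pvLoopA_shift (pvInds cs) b [cs]
      simpa [ih] using this
    · simp only [pvInds, pvExpand, if_neg h]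
      have := pvLoopA_shift (pvInds cs) c [cs]
      simpa [ih] using this

-- B's loop state (R, seg): prefixes R, pending literal chars seg; flushed value below
theorem pvLoopB_expand (s : List Char) (R : List (List Char)) (seg : List Char) :
    ((s.foldl
        (fun (st : List (List Char) × List Char) ch =>
          if ch == '-' then
            (st.1.flatMap (fun r => (['A', 'T', 'C', 'G']).map (fun base => r ++ st.2 ++ [base])),
             ([] : List Char))
          else
            (st.1, st.2 ++ [ch])) (R, seg)).1.map
      (fun r => r ++ (s.foldl
        (fun (st : List (List Char) × List Char) ch =>
          if ch == '-' then
            (st.1.flatMap (fun r => (['A', 'T', 'C', 'G']).map (fun base => r ++ st.2 ++ [base])),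
             ([] : List Char))
          else
            (st.1, st.2 ++ [ch])) (R, seg)).2))
      = R.flatMap (fun r => (pvExpand s).map (fun t => (r ++ seg) ++ t)) := by
  induction s generalizing R seg with
  | nil =>
    simp only [List.foldl_nil, pvExpand]
    induction R with
    | nil => rfl
    | cons r R ihr => simp_all
  | cons c cs ih =>
    rw [List.foldl_cons]
    by_cases h : c = '-'
    · subst h
      rw [if_pos (show (('-' == '-') = true) from rfl)]
      rw [ih]
      simp only [pvExpand, if_pos]
      simp [pvBases, List.flatMap_assoc, List.map_map, Function.comp_def, List.append_assoc]
    · rw [if_neg (show ¬((c == '-') = true) by simp [h])]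
      rw [ih]
      simp only [pvExpand, if_neg h]
      simp [List.map_map, Function.comp_def, List.append_assoc]

-- ===== VERDICT (by name: the statement is the Claim_ definition above) =====
theorem get_all_possible_sequences_spec : Claim_equal_get_all_possible_sequences := by
  intro sequence _
  unfold Spec_get_all_possible_sequences get_all_possible_sequences get_all_possible_sequences_alt
  dsimp only
  generalize (PySem.Str.join "" sequence).toList = s
  congr 1
  have hA : (((PySem.List.enumerate s).filter (fun p => p.2 == '-')).map (fun p => p.1))
      = (pvInds s).map (fun n : Nat => (n : Int)) := by
    have := pvEnum_filter s 0
    simp only [zero_add] at this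
    exact this
  rw [hA, List.foldl_map]
  have hset : ∀ (poss : List (List Char)) (n : Nat),
      poss.foldl
        (fun next seq =>
          (['A','T','C','G']).foldl (fun next base => next ++ [PySem.List.pySetD seq (n : Int) base]) next)
        []
      = poss.flatMap (fun seq => pvBases.map (fun b => seq.set n b)) := by
    intro poss n
    have : ∀ seq next, (['A','T','C','G']).foldl
        (fun next base => next ++ [PySem.List.pySetD seq (n : Int) base]) next
        = next ++ pvBases.map (fun b => seq.set n b) := by
      intro seq next
      rw [PySem.List.foldl_append_singleton_eq_map]
      simp [pvBases, PySem.List.pySetD_natCast]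
    calc poss.foldl
          (fun next seq =>
            (['A','T','C','G']).foldl (fun next base => next ++ [PySem.List.pySetD seq (n : Int) base]) next) []
        = poss.foldl (fun next seq => next ++ pvBases.map (fun b => seq.set n b)) [] := by
          apply List.foldl_ext
          intro acc x _; exact this x acc
      _ = poss.flatMap (fun seq => pvBases.map (fun b => seq.set n b)) := by
          rw [PySem.List.foldl_append_eq_flatMap]; rfl
  have hloop : (List.foldl
      (fun poss (n : Nat) =>
        poss.foldl
          (fun next seq =>
            (['A','T','C','G']).foldl (fun next base => next ++ [PySem.List.pySetD seq (n : Int) base]) next)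
          [])
      [s] (pvInds s)) = pvLoopA (pvInds s) [s] := by
    apply List.foldl_ext
    intro poss n _; exact hset poss n
  rw [hloop, pvLoopA_expand]
  rw [pvLoopB_expand s [[]] []]
  simp
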